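-- pv_equiv track=rewrite | github.com/Mari-ssa/tds_project1_IITM | model_utils.py | select_relevant_chunks
-- ===== SOURCE A (Python) =====
-- def select_relevant_chunks(question, chunks, top_k=3):
--     """Select chunks with highest keyword overlap with question."""
--     question_words = set(question.lower().split())
--     scored = []
--     for chunk in chunks:
--         chunk_words = set(chunk.lower().split())
--         score = len(question_words.intersection(chunk_words))
--         scored.append((score, chunk))
--     scored.sort(key=lambda x: x[0], reverse=True)
--     relevant = [chunk for score, chunk in scored if score > 0][:top_k]
--     if not relevant:
--         # fallback if no overlap found
--         relevant = chunks[:top_k]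
--     return relevant
-- ===== SOURCE B (Python) =====
-- def select_relevant_chunks(question, chunks, top_k=3):
--     """Counting-bucket selection: collect chunks score-by-score from the
--     highest possible score down, instead of sorting the scored list."""
--     question_words = set(question.lower().split())
--     scores = [len(question_words & set(c.lower().split())) for c in chunks]
--     relevant = [c for s in range(len(question_words), 0, -1)
--                 for c, sc in zip(chunks, scores) if sc == s][:top_k]
--     return relevant if relevant else chunks[:top_k]
-- ===== Notes on version B (the rewrite author's own statement) =====
-- stated objective: alternative
-- what changed: Replaces the stable reverse sort of all (score, chunk) pairs by a sort-free counting-bucket pass: scores are computed once, then chunks are collected score-by-score from the maximum possible score (the question's word count) down to 1, preserving original order within each score.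
import Mathlib
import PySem

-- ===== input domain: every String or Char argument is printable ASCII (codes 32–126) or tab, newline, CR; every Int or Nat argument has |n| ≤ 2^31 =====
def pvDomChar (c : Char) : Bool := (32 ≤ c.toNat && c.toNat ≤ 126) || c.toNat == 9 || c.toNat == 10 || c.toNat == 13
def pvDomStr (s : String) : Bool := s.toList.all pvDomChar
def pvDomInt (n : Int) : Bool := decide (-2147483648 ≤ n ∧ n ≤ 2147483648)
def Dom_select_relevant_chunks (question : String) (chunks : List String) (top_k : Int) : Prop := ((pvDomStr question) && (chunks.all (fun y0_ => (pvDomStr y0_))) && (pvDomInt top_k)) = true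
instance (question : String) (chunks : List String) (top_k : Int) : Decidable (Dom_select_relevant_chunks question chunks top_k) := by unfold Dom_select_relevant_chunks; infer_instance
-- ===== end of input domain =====

-- B replaces A's stable reverse sort of all (score, chunk) pairs by a sort-free
-- counting-bucket pass over the possible scores (objective: alternative; same result).

-- ===== PORT A =====
def select_relevant_chunks (question : String) (chunks : List String) (top_k : Int) : List String :=
  let question_words := PySem.Set.ofList (PySem.Str.split₀ (PySem.Str.lower question))
  let scored : List (Int × String) := chunks.foldl (fun acc chunk =>
    let chunk_words := PySem.Set.ofList (PySem.Str.split₀ (PySem.Str.lower chunk))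
    let score := PySem.Set.len (PySem.Set.inter question_words chunk_words)
    acc ++ [(score, chunk)]) []
  let scoredSorted := PySem.List.sorted scored Prod.fst true
  let relevant := PySem.List.slice (scoredSorted.filterMap (fun p => if 0 < p.1 then some p.2 else none)) none (some top_k)
  if relevant = [] then PySem.List.slice chunks none (some top_k) else relevant

-- ===== PORT B =====
def select_relevant_chunks_alt (question : String) (chunks : List String) (top_k : Int) : List String :=
  let question_words := PySem.Set.ofList (PySem.Str.split₀ (PySem.Str.lower question))
  let scores : List Int := chunks.map (fun c =>
    PySem.Set.len (PySem.Set.inter question_words (PySem.Set.ofList (PySem.Str.split₀ (PySem.Str.lower c)))))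
  let relevant := PySem.List.slice
    ((PySem.List.pyRange (PySem.Set.len question_words) 0 (-1)).flatMap (fun s =>
      (chunks.zip scores).filterMap (fun p => if p.2 = s then some p.1 else none)))
    none (some top_k)
  if relevant = [] then PySem.List.slice chunks none (some top_k) else relevant

-- ===== PRECONDITION & SPEC =====
def Spec_select_relevant_chunks (question : String) (chunks : List String) (top_k : Int) (out : List String) : Prop := out = select_relevant_chunks_alt question chunks top_k
instance (question : String) (chunks : List String) (top_k : Int) (out : List String) : Decidable (Spec_select_relevant_chunks question chunks top_k out) := by unfold Spec_select_relevant_chunks; infer_instance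

-- ===== CLAIM (what is proved, stated in full; the proofs are below) =====
def Claim_equal_select_relevant_chunks : Prop := ∀ (question : String) (chunks : List String) (top_k : Int), Dom_select_relevant_chunks question chunks top_k → Spec_select_relevant_chunks question chunks top_k (select_relevant_chunks question chunks top_k)

-- ===== LEMMAS AND PROOFS =====

-- [n, n-1, …, 1] as a list of Ints
def pvDescFrom : Nat → List Int
  | 0 => []
  | n+1 => ((n : Int) + 1) :: pvDescFrom n

theorem pv_mem_descFrom {s : Int} : ∀ {n : Nat}, s ∈ pvDescFrom n → 1 ≤ s ∧ s ≤ (n : Int) := by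
  intro n h
  induction n with
  | zero => simp [pvDescFrom] at h
  | succ k ih =>
    simp only [pvDescFrom, List.mem_cons] at h
    rcases h with h | h
    · subst h; constructor <;> omega
    · have := ih h; push_cast; omega

theorem pv_pyRange_descFrom (n : Nat) : PySem.List.pyRange (n : Int) 0 (-1) = pvDescFrom n := by
  induction n with
  | zero => exact PySem.List.pyRange_neg_one_eq_nil (by norm_num)
  | succ k ih =>
    rw [PySem.List.pyRange_neg_one_cons (by push_cast; omega)]
    have h1 : ((k : Int) + 1) - 1 = (k : Int) := by ring
    simp only [pvDescFrom, Nat.cast_succ, h1, ih]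

theorem pv_insertBy_append_left {α : Type} (before : α → α → Bool) (x : α) (P S : List α)
    (h : ∀ y ∈ P, before x y = false) :
    PySem.List.insertBy before x (P ++ S) = P ++ PySem.List.insertBy before x S := by
  induction P with
  | nil => simp
  | cons y P ih =>
    have hy : before x y = false := h y (by simp)
    simp only [List.cons_append, PySem.List.insertBy, hy]
    simp only [ih (fun z hz => h z (by simp [hz]))]
    simp

theorem pv_insertBy_front {α : Type} (before : α → α → Bool) (x : α) (S : List α)
    (h : ∀ hd ∈ S.head?, before x hd = true) :
    PySem.List.insertBy before x S = x :: S := by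
  cases S with
  | nil => rfl
  | cons hd t =>
    have : before x hd = true := h hd (by simp)
    simp [PySem.List.insertBy, this]

theorem pv_sorted_append_singleton (l : List (Int × String)) (x : Int × String) :
    PySem.List.sorted (l ++ [x]) Prod.fst true
      = PySem.List.insertBy (fun a b => decide (b.1 < a.1)) x (PySem.List.sorted l Prod.fst true) := by
  rw [PySem.List.sorted_rev_eq_foldl_insertBy, PySem.List.sorted_rev_eq_foldl_insertBy, List.foldl_append]
  rfl

-- stable descending sort pulls the maximal bucket to the front
theorem pv_pull_max (m : Int) : ∀ l : List (Int × String), (∀ p ∈ l, p.1 ≤ m) →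
    PySem.List.sorted l Prod.fst true
      = l.filter (fun p => decide (p.1 = m))
        ++ PySem.List.sorted (l.filter (fun p => decide (¬ p.1 = m))) Prod.fst true := by
  intro l
  induction l using List.reverseRecOn with
  | nil => intro _; simp [PySem.List.sorted]
  | append_singleton l x ih =>
    intro h
    have hl : ∀ p ∈ l, p.1 ≤ m := fun p hp => h p (by simp [hp])
    have hx : x.1 ≤ m := h x (by simp)
    rw [pv_sorted_append_singleton, ih hl]
    have hF : ∀ y ∈ l.filter (fun p => decide (p.1 = m)), decide (y.1 < x.1) = false := by
      intro y hy
      have : y.1 = m := by simpa using (List.mem_filter.mp hy).2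
      simp only [decide_eq_false_iff_not, not_lt, this]
      exact hx
    by_cases hxm : x.1 = m
    · rw [pv_insertBy_append_left _ _ _ _ hF, pv_insertBy_front]
      · rw [List.filter_append, List.filter_append]
        simp [hxm]
      · intro hd hhd
        have hmem : hd ∈ PySem.List.sorted (l.filter (fun p => decide (¬ p.1 = m))) Prod.fst true :=
          List.mem_of_mem_head? hhd
        have hmem' := (PySem.List.mem_sorted _ _ _ _).mp hmem
        have h1 : ¬ hd.1 = m := by simpa using (List.mem_filter.mp hmem').2
        have h2 : hd.1 ≤ m := hl hd (List.mem_filter.mp hmem').1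
        simp only [decide_eq_true_eq, hxm]
        omega
    · rw [pv_insertBy_append_left _ _ _ _ hF, ← pv_sorted_append_singleton]
      rw [List.filter_append, List.filter_append]
      simp [hxm]

-- stable descending sort = concatenation of the score buckets, highest score first
theorem pv_buckets : ∀ (n : Nat) (l : List (Int × String)), (∀ p ∈ l, 0 ≤ p.1 ∧ p.1 ≤ (n : Int)) →
    PySem.List.sorted l Prod.fst true
      = (pvDescFrom n ++ [(0 : Int)]).flatMap (fun s => l.filter (fun p => decide (p.1 = s))) := by
  intro n
  induction n with
  | zero =>
    intro l h
    have hz : ∀ p ∈ l, p.1 = 0 := fun p hp => le_antisymm (by exact_mod_cast (h p hp).2) (h p hp).1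
    rw [PySem.List.sorted_rev_eq_self_of_pairwise]
    · simp only [pvDescFrom, List.nil_append, List.flatMap_cons, List.flatMap_nil, List.append_nil]
      rw [List.filter_eq_self.mpr]
      intro p hp; simp [hz p hp]
    · exact List.pairwise_of_forall_mem_list (fun a ha b hb => by rw [hz a ha, hz b hb])
  | succ k ih =>
    intro l h
    have hle : ∀ p ∈ l, p.1 ≤ (k : Int) + 1 := by
      intro p hp; have := (h p hp).2; push_cast at this; omega
    rw [pv_pull_max ((k : Int) + 1) l hle]
    have hsub : ∀ p ∈ l.filter (fun p => decide (¬ p.1 = (k : Int) + 1)), 0 ≤ p.1 ∧ p.1 ≤ (k : Int) := by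
      intro p hp
      have h1 := h p (List.mem_filter.mp hp).1
      have h2 : ¬ p.1 = (k : Int) + 1 := by simpa using (List.mem_filter.mp hp).2
      push_cast at h1
      omega
    rw [ih _ hsub]
    simp only [pvDescFrom, List.cons_append, List.flatMap_cons]
    congr 1
    apply List.flatMap_congr
    intro s hs
    have hsk : s ≤ (k : Int) := by
      rcases List.mem_append.mp hs with h' | h'
      · exact (pv_mem_descFrom h').2
      · simp at h'; omega
    rw [List.filter_filter]
    apply List.filter_congr
    intro p _
    by_cases hp : p.1 = s
    · simp only [hp]
      have hne : ¬ s = (k : Int) + 1 := by omega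
      simp [hne]
    · simp [hp]

theorem pv_foldl_snoc_map {α β : Type} (g : α → β) : ∀ (l : List α) (acc : List β),
    l.foldl (fun acc x => acc ++ [g x]) acc = acc ++ l.map g := by
  intro l
  induction l with
  | nil => simp
  | cons x l ih => intro acc; simp [ih]

theorem pv_zip_self_map {α β : Type} (f : α → β) : ∀ l : List α,
    l.zip (l.map f) = l.map (fun x => (x, f x)) := by
  intro l
  induction l with
  | nil => rfl
  | cons x l ih => simp [ih]

theorem pv_filterMap_if {α : Type} (f : α → Int) (s : Int) : ∀ l : List α,
    l.filterMap (fun c => if f c = s then some c else none) = l.filter (fun c => decide (f c = s)) := by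
  intro l
  induction l with
  | nil => rfl
  | cons x l ih =>
    by_cases hx : f x = s <;> simp [hx, ih]

theorem pv_filterMap_pos_filter (f : String → Int) (s : Int) (hs : 0 < s) (chunks : List String) :
    ((chunks.map (fun c => (f c, c))).filter (fun p => decide (p.1 = s))).filterMap
        (fun p => if 0 < p.1 then some p.2 else none)
      = chunks.filter (fun c => decide (f c = s)) := by
  induction chunks with
  | nil => rfl
  | cons x l ih =>
    by_cases hx : f x = s
    · simp [hx, hs, ih]
    · simp [hx, ih]

theorem pv_filterMap_pos_zero (f : String → Int) (chunks : List String) :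
    ((chunks.map (fun c => (f c, c))).filter (fun p => decide (p.1 = (0:Int)))).filterMap
        (fun p => if 0 < p.1 then some p.2 else none)
      = [] := by
  induction chunks with
  | nil => rfl
  | cons x l ih =>
    by_cases hx : f x = (0:Int)
    · simp [hx, ih]
    · simp [hx, ih]

-- the common normal form of both programs' "relevant" list (before slicing)
theorem pv_rel (f : String → Int) (n : Nat) (hb : ∀ c, 0 ≤ f c ∧ f c ≤ (n : Int))
    (chunks : List String) :
    ((PySem.List.sorted (chunks.map (fun c => (f c, c))) Prod.fst true).filterMap
        (fun p => if 0 < p.1 then some p.2 else none))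
      = (PySem.List.pyRange (n : Int) 0 (-1)).flatMap (fun s =>
          (chunks.zip (chunks.map f)).filterMap (fun p => if p.2 = s then some p.1 else none)) := by
  have hbound : ∀ p ∈ chunks.map (fun c => (f c, c)), 0 ≤ p.1 ∧ p.1 ≤ (n : Int) := by
    intro p hp
    rcases List.mem_map.mp hp with ⟨c, _, rfl⟩
    exact hb c
  rw [pv_buckets n _ hbound, List.filterMap_flatMap, pv_pyRange_descFrom, List.flatMap_append]
  have hzero :
      List.flatMap (fun s => ((chunks.map (fun c => (f c, c))).filter
          (fun p => decide (p.1 = s))).filterMap (fun p => if 0 < p.1 then some p.2 else none))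
        [(0 : Int)] = [] := by
    simp only [List.flatMap_cons, List.flatMap_nil, List.append_nil]
    exact pv_filterMap_pos_zero f chunks
  rw [hzero, List.append_nil]
  apply List.flatMap_congr
  intro s hs
  have hs1 : 1 ≤ s := (pv_mem_descFrom hs).1
  rw [pv_filterMap_pos_filter f s (by omega) chunks]
  rw [pv_zip_self_map, List.filterMap_map, ← pv_filterMap_if f s chunks]
  rfl

theorem pv_main (question : String) (chunks : List String) (top_k : Int) :
    select_relevant_chunks question chunks top_k = select_relevant_chunks_alt question chunks top_k := by
  unfold select_relevant_chunks select_relevant_chunks_alt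
  simp only []
  rw [pv_foldl_snoc_map (fun chunk => (PySem.Set.len (PySem.Set.inter
        (PySem.Set.ofList (PySem.Str.split₀ (PySem.Str.lower question)))
        (PySem.Set.ofList (PySem.Str.split₀ (PySem.Str.lower chunk)))), chunk)) chunks [],
      List.nil_append]
  rw [pv_rel (fun c => PySem.Set.len (PySem.Set.inter
        (PySem.Set.ofList (PySem.Str.split₀ (PySem.Str.lower question)))
        (PySem.Set.ofList (PySem.Str.split₀ (PySem.Str.lower c)))))
      (PySem.Set.ofList (PySem.Str.split₀ (PySem.Str.lower question))).length
      (by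
        intro c
        constructor
        · simp only [PySem.Set.len]
          exact Int.natCast_nonneg _
        · simp only [PySem.Set.len, PySem.Set.inter, Nat.cast_le]
          exact List.length_filter_le _ _)
      chunks]
  rfl

-- ===== VERDICT (by name: the statement is the Claim_ definition above) =====
theorem select_relevant_chunks_spec : Claim_equal_select_relevant_chunks := by
  intro question chunks top_k _
  unfold Spec_select_relevant_chunks
  exact pv_main question chunks top_k
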